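-- pv_equiv track=rewrite | github.com/isaaclayton/jeopardy_project | extraction.py | get_clue_order
-- ===== SOURCE A (Python) =====
-- def get_clue_order(order_list):
--     clue_order = []
--     total = 0
--     for i, _round in enumerate(order_list):
--         if i==0:
--             clue_order.extend(_round)
--         else:
--             clue_order.extend([total + clue for clue in _round])
--         total += len(_round)
--     return clue_order
-- ===== SOURCE B (Python) =====
-- def get_clue_order(order_list):
--     # Divide and conquer: no running total, no prefix table. Flatten each
--     # half recursively, then shift the right half's result by the length of
--     # the left half's (already flattened) result. Correct because a clue in
--     # round i is shifted exactly by the clues of the rounds split off to its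
--     # left, i.e. the sum of their lengths.
--     def go(ls):
--         if not ls:
--             return []
--         if len(ls) == 1:
--             return list(ls[0])
--         mid = len(ls) // 2
--         left = go(ls[:mid])
--         right = go(ls[mid:])
--         return left + [len(left) + c for c in right]
--     return go(order_list)
-- ===== Notes on version B (the rewrite author's own statement) =====
-- stated objective: alternative
-- what changed: B flattens by divide and conquer: it recursively flattens the two halves of the round list and shifts the right half's flattened result by the length of the left half's result, computing no running offset total and no prefix table.
import Mathlib
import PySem

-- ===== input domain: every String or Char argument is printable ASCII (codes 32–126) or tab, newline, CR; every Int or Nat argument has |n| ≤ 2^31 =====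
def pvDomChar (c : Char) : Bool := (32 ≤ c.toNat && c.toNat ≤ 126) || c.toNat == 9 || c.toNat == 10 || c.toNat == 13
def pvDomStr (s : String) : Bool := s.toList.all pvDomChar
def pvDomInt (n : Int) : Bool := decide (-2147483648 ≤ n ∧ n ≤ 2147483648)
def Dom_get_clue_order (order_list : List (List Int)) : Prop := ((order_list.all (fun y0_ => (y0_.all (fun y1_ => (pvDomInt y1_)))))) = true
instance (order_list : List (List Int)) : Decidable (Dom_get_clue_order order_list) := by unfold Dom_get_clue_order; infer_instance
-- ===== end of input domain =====

-- B flattens by divide and conquer, shifting the right half's flattened result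
-- by the length of the left half's result; no running offset total (objective: alternative algorithm).

-- ===== PORT A =====
def get_clue_order (order_list : List (List Int)) : List Int :=
  ((PySem.List.enumerate order_list 0).foldl
    (fun (st : List Int × Int) (p : Int × List Int) =>
      if p.1 == 0 then (st.1 ++ p.2, st.2 + (p.2.length : Int))
      else (st.1 ++ p.2.map (fun clue => st.2 + clue), st.2 + (p.2.length : Int)))
    ([], 0)).1

-- ===== PORT B =====
-- helper `go` of Source B: recursive halving with slices ls[:mid], ls[mid:]
def goB (ls : List (List Int)) : List Int :=
  match ls with
  | [] => []
  | [r] => r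
  | a :: b :: rest =>
    let mid := (a :: b :: rest).length / 2
    let left := goB ((a :: b :: rest).take ((a :: b :: rest).length / 2))
    let right := goB ((a :: b :: rest).drop ((a :: b :: rest).length / 2))
    left ++ right.map (fun c => (left.length : Int) + c)
termination_by ls.length
decreasing_by
  · simp; omega
  · simp; omega

def get_clue_order_alt (order_list : List (List Int)) : List Int :=
  goB order_list

-- ===== PRECONDITION & SPEC =====
def Spec_get_clue_order (order_list : List (List Int)) (out : List Int) : Prop := out = get_clue_order_alt order_list
instance (order_list : List (List Int)) (out : List Int) : Decidable (Spec_get_clue_order order_list out) := by unfold Spec_get_clue_order; infer_instance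

-- ===== CLAIM (what is proved, stated in full; the proofs are below) =====
def Claim_equal_get_clue_order : Prop := ∀ (order_list : List (List Int)), Dom_get_clue_order order_list → Spec_get_clue_order order_list (get_clue_order order_list)

-- ===== LEMMAS AND PROOFS =====

-- the flattened result with every round r shifted by the cumulative length before it
def flatOff : Int → List (List Int) → List Int
  | _, [] => []
  | t, r :: rs => r.map (fun c => t + c) ++ flatOff (t + (r.length : Int)) rs

def sumLen (ls : List (List Int)) : Int := ((ls.map List.length).sum : Nat)

theorem flatOff_append (xs ys : List (List Int)) : ∀ (t : Int),
    flatOff t (xs ++ ys) = flatOff t xs ++ flatOff (t + sumLen xs) ys := by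
  induction xs with
  | nil => intro t; simp [flatOff, sumLen]
  | cons r rs ih =>
    intro t
    simp only [List.cons_append, flatOff, ih, sumLen, List.map_cons, List.sum_cons]
    simp only [List.append_assoc]
    congr 2
    push_cast
    ring_nf

theorem length_flatOff (ls : List (List Int)) : ∀ (t : Int),
    ((flatOff t ls).length : Int) = sumLen ls := by
  induction ls with
  | nil => intro t; simp [flatOff, sumLen]
  | cons r rs ih =>
    intro t
    simp only [flatOff, List.length_append, List.length_map, sumLen, List.map_cons,
      List.sum_cons]
    push_cast
    rw [show ((flatOff (t + (r.length : Int)) rs).length : Int) = sumLen rs from ih _]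
    simp [sumLen]

theorem map_add_flatOff (ls : List (List Int)) : ∀ (s t : Int),
    (flatOff t ls).map (fun c => s + c) = flatOff (s + t) ls := by
  induction ls with
  | nil => intro s t; simp [flatOff]
  | cons r rs ih =>
    intro s t
    simp only [flatOff, List.map_append, List.map_map, ih]
    congr 1
    · congr 1; funext c; simp; ring
    · congr 1; ring

theorem goB_eq_flatOff (ls : List (List Int)) : goB ls = flatOff 0 ls := by
  induction ls using goB.induct with
  | case1 => simp [goB, flatOff]
  | case2 r => simp [goB, flatOff]
  | case3 a b rest ihl ihr =>
    simp only at ihl ihr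
    rw [goB]
    simp only [ihl, ihr]
    have hsplit : (a :: b :: rest) = (a :: b :: rest).take ((a :: b :: rest).length / 2) ++ (a :: b :: rest).drop ((a :: b :: rest).length / 2) :=
      (List.take_append_drop ((a :: b :: rest).length / 2) (a :: b :: rest)).symm
    calc flatOff 0 ((a :: b :: rest).take ((a :: b :: rest).length / 2))
          ++ (flatOff 0 ((a :: b :: rest).drop ((a :: b :: rest).length / 2))).map
              (fun c => ((flatOff 0 ((a :: b :: rest).take ((a :: b :: rest).length / 2))).length : Int) + c)
        = flatOff 0 ((a :: b :: rest).take ((a :: b :: rest).length / 2))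
          ++ (flatOff 0 ((a :: b :: rest).drop ((a :: b :: rest).length / 2))).map
              (fun c => sumLen ((a :: b :: rest).take ((a :: b :: rest).length / 2)) + c) := by
          rw [length_flatOff]
      _ = flatOff 0 ((a :: b :: rest).take ((a :: b :: rest).length / 2))
          ++ flatOff (0 + sumLen ((a :: b :: rest).take ((a :: b :: rest).length / 2))) ((a :: b :: rest).drop ((a :: b :: rest).length / 2)) := by
          rw [map_add_flatOff]; ring_nf
      _ = flatOff 0 (a :: b :: rest) := by
          conv_rhs => rw [hsplit]
          rw [flatOff_append]

theorem aLoop (l : List (List Int)) : ∀ (k : Int), 1 ≤ k → ∀ (acc : List Int) (t : Int),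
    ((PySem.List.enumerate l k).foldl
      (fun (st : List Int × Int) (p : Int × List Int) =>
        if p.1 == 0 then (st.1 ++ p.2, st.2 + (p.2.length : Int))
        else (st.1 ++ p.2.map (fun clue => st.2 + clue), st.2 + (p.2.length : Int)))
      (acc, t)).1 = acc ++ flatOff t l := by
  induction l with
  | nil => intro k _ acc t; simp [PySem.List.enumerate_nil, flatOff]
  | cons r rs ih =>
    intro k hk acc t
    have hk0 : (k == 0) = false := beq_eq_false_iff_ne.mpr (by omega)
    rw [PySem.List.enumerate_cons, List.foldl_cons]
    simp only [hk0, Bool.false_eq_true, if_false, ih (k + 1) (by omega : (1:Int) ≤ k + 1)]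
    simp [flatOff]

theorem get_clue_order_eq (order_list : List (List Int)) :
    get_clue_order order_list = get_clue_order_alt order_list := by
  rw [show get_clue_order_alt order_list = flatOff 0 order_list from goB_eq_flatOff order_list]
  unfold get_clue_order
  cases order_list with
  | nil => simp [PySem.List.enumerate_nil, flatOff]
  | cons r rs =>
    rw [PySem.List.enumerate_cons, List.foldl_cons]
    simp only [beq_self_eq_true, if_true, List.nil_append, zero_add,
      aLoop rs 1 (by omega : (1:Int) ≤ 1)]
    simp [flatOff]

-- ===== VERDICT (by name: the statement is the Claim_ definition above) =====
theorem get_clue_order_spec : Claim_equal_get_clue_order := by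
  intro order_list _
  unfold Spec_get_clue_order
  exact get_clue_order_eq order_list
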